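-- pv_equiv track=rewrite | github.com/sanketrao411/DSA-TopicWise-Codes | ZZZ/test.py | longest_special_subsequence
-- ===== SOURCE A (Python) =====
-- def longest_special_subsequence(t, test_cases):
--     results = []
--     for case in test_cases:
--         n = case[0]
--         a = case[1]
--         count = {}
--
--         for num in a:
--             if num in count:
--                 count[num] += 1
--             else:
--                 count[num] = 1
--
--         # Determine the maximum number of elements we can include in the special subsequence
--         unique_numbers = set(a)
--         if len(unique_numbers) < n:  # There are duplicates
--             results.append(n)
--         else:
--             results.append(n - 1)
--
--     return results
-- ===== SOURCE B (Python) =====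
-- def longest_special_subsequence(t, test_cases):
--     out = []
--     for n, a in test_cases:
--         s = sorted(a)
--         if not s:
--             distinct = 0
--         else:
--             distinct = 1
--             prev = s[0]
--             for x in s[1:]:
--                 if x != prev:
--                     distinct += 1
--                 prev = x
--         out.append(n if distinct < n else n - 1)
--     return out
-- ===== Notes on version B (the rewrite author's own statement) =====
-- stated objective: alternative
-- what changed: Replaces the dead count dict and the hash-set distinct count with a sort-then-scan: sort a copy of the array and count adjacent changes to get the number of distinct values.
import Mathlib
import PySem

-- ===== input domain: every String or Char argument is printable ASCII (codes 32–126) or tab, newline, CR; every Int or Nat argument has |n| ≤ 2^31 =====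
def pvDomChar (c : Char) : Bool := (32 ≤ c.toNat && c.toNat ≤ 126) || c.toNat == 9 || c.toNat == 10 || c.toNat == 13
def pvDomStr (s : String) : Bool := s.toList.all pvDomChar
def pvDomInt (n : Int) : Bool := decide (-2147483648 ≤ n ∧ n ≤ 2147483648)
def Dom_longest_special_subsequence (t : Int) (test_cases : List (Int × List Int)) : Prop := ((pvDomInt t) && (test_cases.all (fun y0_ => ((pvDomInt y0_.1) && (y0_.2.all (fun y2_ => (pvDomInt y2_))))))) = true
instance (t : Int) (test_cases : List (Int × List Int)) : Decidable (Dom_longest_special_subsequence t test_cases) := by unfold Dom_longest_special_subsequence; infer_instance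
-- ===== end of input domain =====

-- B replaces the dead count dict and the hash-set distinct count with sort-then-scan
-- (sort a copy, count adjacent changes); same results, a genuinely different traversal.


-- ===== PORT A =====
def longest_special_subsequence (t : Int) (test_cases : List (Int × List Int)) : List Int :=
  test_cases.foldl (fun results case_ =>
    let n := case_.1
    let a := case_.2
    -- count = {}; for num in a: count[num] += 1 / count[num] = 1   (dict is built but unused afterwards)
    let _count : PySem.Dict Int Int := a.foldl (fun c num =>
      if c.contains num then c.insert num (c.getD num 0 + 1) else c.insert num 1) PySem.Dict.empty
    let unique_numbers : PySem.Set Int := PySem.Set.ofList a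
    if (unique_numbers.length : Int) < n then results ++ [n] else results ++ [n - 1]) []

-- ===== PORT B =====
-- scan of the tail of the sorted list: counts positions where the value changes
def pvChanges (prev : Int) : List Int → Int
  | [] => 0
  | x :: xs => (if x ≠ prev then 1 else 0) + pvChanges x xs

def pvDistinctSorted : List Int → Int
  | [] => 0
  | x :: xs => 1 + pvChanges x xs

def longest_special_subsequence_alt (t : Int) (test_cases : List (Int × List Int)) : List Int :=
  test_cases.foldl (fun out case_ =>
    let n := case_.1
    let s := PySem.List.sorted case_.2 (fun x => x) false
    let distinct := pvDistinctSorted s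
    out ++ [if distinct < n then n else n - 1]) []

-- ===== PRECONDITION & SPEC =====
def Spec_longest_special_subsequence (t : Int) (test_cases : List (Int × List Int)) (out : List Int) : Prop := out = longest_special_subsequence_alt t test_cases
instance (t : Int) (test_cases : List (Int × List Int)) (out : List Int) : Decidable (Spec_longest_special_subsequence t test_cases out) := by unfold Spec_longest_special_subsequence; infer_instance

-- ===== CLAIM (what is proved, stated in full; the proofs are below) =====
def Claim_equal_longest_special_subsequence : Prop := ∀ (t : Int) (test_cases : List (Int × List Int)), Dom_longest_special_subsequence t test_cases → Spec_longest_special_subsequence t test_cases (longest_special_subsequence t test_cases)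

-- ===== LEMMAS AND PROOFS =====

-- counting adjacent changes in a sorted (Pairwise ≤) nonempty list gives the number of distinct values
lemma pvChanges_sorted (l : List Int) : ∀ prev : Int, ((prev :: l).Pairwise (· ≤ ·)) →
    1 + pvChanges prev l = ((prev :: l).toFinset.card : Int) := by
  induction l with
  | nil => intro prev _; simp [pvChanges]
  | cons y ys ih =>
    intro prev h
    have hpy : prev ≤ y := (List.pairwise_cons.mp h).1 y (by simp)
    have htail : (y :: ys).Pairwise (· ≤ ·) := (List.pairwise_cons.mp h).2
    by_cases hd : y = prev
    · subst hd
      have h1 := ih y htail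
      have h2 : (y :: y :: ys).toFinset = (y :: ys).toFinset := by simp
      simp only [pvChanges, ne_eq, not_true_eq_false, if_false, h2, zero_add]
      exact h1
    · have hne : prev ∉ (y :: ys).toFinset := by
        simp only [List.mem_toFinset, List.mem_cons]
        rintro (rfl | hm)
        · exact hd rfl
        · have hyz : y ≤ prev := (List.pairwise_cons.mp htail).1 _ hm
          have : prev < y := lt_of_le_of_ne hpy (fun e => hd e.symm)
          omega
      have hins : (prev :: y :: ys).toFinset = insert prev (y :: ys).toFinset := by simp
      rw [hins, Finset.card_insert_of_notMem hne]
      have := ih y htail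
      simp only [pvChanges]
      push_cast
      omega

lemma pvDistinctSorted_eq (a : List Int) :
    pvDistinctSorted (PySem.List.sorted a (fun x => x) false) = ((PySem.Set.ofList a).length : Int) := by
  have hperm : (PySem.List.sorted a (fun x => x) false).Perm a := PySem.List.sorted_perm ..
  have hset : (PySem.Set.ofList a).length = a.toFinset.card := by
    have hnd : (PySem.Set.ofList a).Nodup := by
      rw [← PySem.List.dedup_eq_ofList]; exact PySem.List.nodup_dedup a
    have hmem : ∀ x, x ∈ PySem.Set.ofList a ↔ x ∈ a := by
      intro x; rw [← PySem.List.dedup_eq_ofList]; exact PySem.List.mem_dedup ..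
    have : (PySem.Set.ofList a).toFinset = a.toFinset := by
      apply Finset.ext; intro x; simp [hmem x]
    rw [← List.toFinset_card_of_nodup hnd, this]
  rw [hset]
  rcases hs : PySem.List.sorted a (fun x => x) false with _ | ⟨x, xs⟩
  · have : a = [] := by
      have := hperm; rw [hs] at this; exact (List.Perm.nil_eq this).symm
    simp [this, pvDistinctSorted]
  · have hpw : (x :: xs).Pairwise (· ≤ ·) := by
      have := PySem.List.sorted_pairwise (xs := a) (key := fun x => x) (κ := Int)
      rw [hs] at this; exact this
    have hfin : (x :: xs).toFinset = a.toFinset := by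
      have hp : (x :: xs).Perm a := by rw [← hs]; exact hperm
      apply Finset.ext; intro z
      simp only [List.mem_toFinset]
      exact ⟨fun hz => hp.mem_iff.mp hz, fun hz => hp.mem_iff.mpr hz⟩
    rw [show pvDistinctSorted (x :: xs) = 1 + pvChanges x xs from rfl,
        pvChanges_sorted xs x hpw, hfin]

lemma pv_foldl_eq (tcs : List (Int × List Int)) : ∀ acc : List Int,
    tcs.foldl (fun results case_ =>
      let n := case_.1
      let a := case_.2
      let _count : PySem.Dict Int Int := a.foldl (fun c num =>
        if c.contains num then c.insert num (c.getD num 0 + 1) else c.insert num 1) PySem.Dict.empty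
      let unique_numbers : PySem.Set Int := PySem.Set.ofList a
      if (unique_numbers.length : Int) < n then results ++ [n] else results ++ [n - 1]) acc
    = tcs.foldl (fun out case_ =>
      let n := case_.1
      let s := PySem.List.sorted case_.2 (fun x => x) false
      let distinct := pvDistinctSorted s
      out ++ [if distinct < n then n else n - 1]) acc := by
  induction tcs with
  | nil => intro acc; rfl
  | cons c cs ih =>
    intro acc
    simp only [List.foldl_cons]
    rw [ih]
    congr 1
    dsimp only
    rw [← pvDistinctSorted_eq c.2]
    split_ifs <;> rfl

-- ===== VERDICT (by name: the statement is the Claim_ definition above) =====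
theorem longest_special_subsequence_spec : Claim_equal_longest_special_subsequence := by
  intro t tcs _
  show longest_special_subsequence t tcs = longest_special_subsequence_alt t tcs
  exact pv_foldl_eq tcs []
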